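-- pv_equiv track=rewrite | github.com/ToglivvilgoT/Advent-of-Code-2024 | day9.py | disk_insert
-- ===== SOURCE A (Python) =====
-- def disk_insert(disk_map: list[int], reversed_disk_map: list[int]) -> list[int]:
--     """Inserts files into free space for part 1.
--     I tried to do this recursively but reached recursive depth limit even after expanding
--     it to 40000."""
--     # Recursive solution that cooked (cooked my computer)
--     """
--     if not disk_map:
--         return reversed_disk_map
--     elif not reversed_disk_map:
--         return disk_map
--
--     if disk_map[0] == -1:
--         return reversed_disk_map[:1] + disk_insert(disk_map[1:], reversed_disk_map[1:])
--     else: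
--         return disk_map[:1] + disk_insert(disk_map[1:], reversed_disk_map)
--     """
--     # Cringe imperative solution that actually works
--     j = 0
--     for i in range(len(disk_map)):
--         if disk_map[i] == -1:
--             disk_map[i] = reversed_disk_map[j]
--             j += 1
--     return disk_map
-- ===== SOURCE B (Python) =====
-- def disk_insert(disk_map: list[int], reversed_disk_map: list[int]) -> list[int]:
--     # Segment-based: repeatedly locate the next free (-1) slot with list.index,
--     # copy the gap segment wholesale, splice in the next replacement block, and
--     # continue on the remaining suffix; finally write the rebuilt content back.
--     out = []
--     rest = disk_map
--     k = 0
--     while -1 in rest: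
--         i = rest.index(-1)
--         out.extend(rest[:i])
--         out.append(reversed_disk_map[k])
--         k += 1
--         rest = rest[i + 1:]
--     out.extend(rest)
--     disk_map[:] = out
--     return disk_map
-- ===== Notes on version B (the rewrite author's own statement) =====
-- stated objective: alternative
-- what changed: B is a segment-splicing rebuild: it repeatedly finds the next -1 with list.index, copies the non-free gap wholesale by slicing, splices in the next replacement block, and recurses on the remaining suffix, then writes the rebuilt list back into disk_map; A is a single element-by-element scan that tests and conditionally overwrites each cell in place while threading a counter.
import Mathlib
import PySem

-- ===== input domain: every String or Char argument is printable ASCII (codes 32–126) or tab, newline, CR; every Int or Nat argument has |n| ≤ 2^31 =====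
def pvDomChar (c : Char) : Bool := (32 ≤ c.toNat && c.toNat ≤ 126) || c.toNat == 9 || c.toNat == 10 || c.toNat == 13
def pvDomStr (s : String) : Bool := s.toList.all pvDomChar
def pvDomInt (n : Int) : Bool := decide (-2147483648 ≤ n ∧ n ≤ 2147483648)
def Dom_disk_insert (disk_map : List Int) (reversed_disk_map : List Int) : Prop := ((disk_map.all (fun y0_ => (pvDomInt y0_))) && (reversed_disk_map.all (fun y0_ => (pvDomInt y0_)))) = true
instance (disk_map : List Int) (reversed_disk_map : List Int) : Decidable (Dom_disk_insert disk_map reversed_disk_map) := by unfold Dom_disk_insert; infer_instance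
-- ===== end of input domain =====

-- B replaces A's element-by-element conditional scan by a segment-splicing rebuild (find the
-- next -1 with list.index, copy the gap by slicing, splice in the next block, continue on the
-- suffix); same result, different algorithmic decomposition.  Both Pythons mutate disk_map in
-- place and return it; the equivalence proved here is about the return value.
-- All list reads are in range under Pre_ (the out-of-range read of reversed_disk_map, Python's
-- IndexError, is excluded by Pre_), so List.getD is exact here.

-- ===== PORT A =====
-- j = 0; for i in range(len(disk_map)): if disk_map[i] == -1: disk_map[i] = reversed_disk_map[j]; j += 1
def disk_insert (disk_map : List Int) (reversed_disk_map : List Int) : List Int :=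
  (List.foldl
    (fun (st : List Int × Nat) (i : Nat) =>
      if st.1.getD i 0 = -1 then (st.1.set i (reversed_disk_map.getD st.2 0), st.2 + 1) else st)
    (disk_map, 0) (List.range disk_map.length)).1

-- ===== PORT B =====
-- while -1 in rest: i = rest.index(-1); out += rest[:i]; out.append(reversed[k]); k += 1; rest = rest[i+1:]
def diLoop (rm : List Int) (rest : List Int) (k : Nat) (out : List Int) : List Int :=
  if h : (-1 : Int) ∈ rest then
    let i := (PySem.List.index? rest (-1)).getD 0
    diLoop rm (rest.drop (i + 1)) (k + 1) (out ++ rest.take i ++ [rm.getD k 0])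
  else out ++ rest
termination_by rest.length
decreasing_by
  have hpos : 0 < rest.length := List.length_pos_of_ne_nil (List.ne_nil_of_mem h)
  simp only [List.length_drop]; omega

def disk_insert_alt (disk_map : List Int) (reversed_disk_map : List Int) : List Int :=
  diLoop reversed_disk_map disk_map 0 []

-- ===== PRECONDITION & SPEC =====
-- Pre_ excludes exactly the inputs on which Python A raises IndexError: more -1 slots than
-- replacement blocks.
def Pre_disk_insert (disk_map : List Int) (reversed_disk_map : List Int) : Prop :=
  disk_map.count (-1) ≤ reversed_disk_map.length
instance (disk_map : List Int) (reversed_disk_map : List Int) : Decidable (Pre_disk_insert disk_map reversed_disk_map) := by unfold Pre_disk_insert; infer_instance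
def pvWitness_disk_insert : List Int × List Int := ([0, -1, 2, -1], [9, 8])
def Spec_disk_insert (disk_map : List Int) (reversed_disk_map : List Int) (out : List Int) : Prop := out = disk_insert_alt disk_map reversed_disk_map
instance (disk_map : List Int) (reversed_disk_map : List Int) (out : List Int) : Decidable (Spec_disk_insert disk_map reversed_disk_map out) := by unfold Spec_disk_insert; infer_instance

-- ===== CLAIM (what is proved, stated in full; the proofs are below) =====
def Claim_equal_disk_insert : Prop := ∀ (disk_map : List Int) (reversed_disk_map : List Int), Dom_disk_insert disk_map reversed_disk_map → Pre_disk_insert disk_map reversed_disk_map → Spec_disk_insert disk_map reversed_disk_map (disk_insert disk_map reversed_disk_map)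

-- ===== LEMMAS AND PROOFS =====

-- Common reference function: replace the -1's of the list by successive blocks, counting from k.
def fillR (rm : List Int) : List Int → Nat → List Int
  | [], _ => []
  | x :: xs, k => if x = -1 then rm.getD k 0 :: fillR rm xs (k + 1) else x :: fillR rm xs k

theorem fillR_of_not_mem (rm : List Int) :
    ∀ (l : List Int) (k : Nat), (-1 : Int) ∉ l → fillR rm l k = l := by
  intro l
  induction l with
  | nil => intro k _; rfl
  | cons x xs ih =>
    intro k h
    have hx : x ≠ -1 := fun hc => h (by simp [hc])
    have hxs : (-1 : Int) ∉ xs := fun hc => h (List.mem_cons_of_mem _ hc)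
    simp [fillR, hx, ih k hxs]

-- B's segment loop computes out ++ fillR.
theorem diLoop_eq (rm : List Int) :
    ∀ (rest : List Int) (k : Nat) (out : List Int),
      diLoop rm rest k out = out ++ fillR rm rest k := by
  intro rest
  induction rest with
  | nil => intro k out; rw [diLoop.eq_def]; simp [fillR]
  | cons x xs ih =>
    intro k out
    by_cases hx : x = -1
    · subst hx
      rw [diLoop.eq_def]
      simp only [List.mem_cons, true_or, dite_true, PySem.List.index?_cons_self,
        Option.getD_some, List.take_zero, List.drop_succ_cons, List.drop_zero,
        List.append_nil, eq_self_iff_true, if_true]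
      rw [ih]
      simp [fillR]
    · by_cases hmem : (-1 : Int) ∈ xs
      · rw [diLoop.eq_def]
        have hne : x ≠ (-1 : Int) := hx
        have hidx := PySem.List.index?_cons_of_ne (xs := xs) (v := (-1 : Int)) hne
        obtain ⟨i0, hi0⟩ := Option.isSome_iff_exists.mp
          ((PySem.List.index?_isSome_iff (xs := xs) (v := (-1 : Int))).mpr hmem)
        have hmem' : (-1 : Int) ∈ x :: xs := List.mem_cons_of_mem _ hmem
        simp only [hmem', dite_true, hidx, hi0, Option.map_some, Option.getD_some,
          List.take_succ_cons, List.drop_succ_cons]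
        -- on the other side, unfold one diLoop step on xs
        conv_rhs => rw [show fillR rm (x :: xs) k = x :: fillR rm xs k by simp [fillR, hx]]
        have : diLoop rm xs k (out ++ [x]) = (out ++ [x]) ++ fillR rm xs k := ih k (out ++ [x])
        rw [diLoop.eq_def] at this
        simp only [hmem, dite_true, hi0, Option.getD_some, List.drop_succ_cons] at this
        -- `this` relates the same recursive call; massage appends
        rw [show out ++ (x :: xs.take i0) ++ [rm.getD k 0]
              = (out ++ [x]) ++ xs.take i0 ++ [rm.getD k 0] by simp]
        rw [this]
        simp
      · have hall : (-1 : Int) ∉ x :: xs := by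
          intro hc
          rcases List.mem_cons.mp hc with h1 | h2
          · exact hx h1.symm
          · exact hmem h2
        rw [diLoop.eq_def]
        simp only [hall, dite_false]
        rw [fillR_of_not_mem rm _ k hall]

-- A's indexed fold over a suffix t sitting after an already-processed prefix p.
theorem foldA_eq (rm : List Int) :
    ∀ (t p : List Int) (j : Nat),
      List.foldl
        (fun (st : List Int × Nat) (i : Nat) =>
          if st.1.getD i 0 = -1 then (st.1.set i (rm.getD st.2 0), st.2 + 1) else st)
        (p ++ t, j) (List.range' p.length t.length)
      = (p ++ fillR rm t j, j + t.count (-1)) := by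
  intro t
  induction t with
  | nil => intro p j; simp [fillR]
  | cons x xs ih =>
    intro p j
    rw [List.length_cons, List.range'_succ, List.foldl_cons]
    have hget : (p ++ x :: xs).getD p.length 0 = x := by
      simp [List.getD, List.getElem?_append_right (Nat.le_refl p.length)]
    by_cases hx : x = -1
    · have hset : (p ++ x :: xs).set p.length (rm.getD j 0)
          = (p ++ [rm.getD j 0]) ++ xs := by
        simp [List.set_append]
      rw [if_pos (by rw [hget, hx])]
      simp only [hset]
      have hlen : p.length + 1 = (p ++ [rm.getD j 0]).length := by simp
      rw [hlen, ih (p ++ [rm.getD j 0]) (j + 1)]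
      subst hx
      simp [fillR, List.count_cons]
      omega
    · rw [if_neg (by rw [hget]; exact hx)]
      have hsplit : p ++ x :: xs = (p ++ [x]) ++ xs := by simp
      have hlen : p.length + 1 = (p ++ [x]).length := by simp
      rw [hsplit, hlen, ih (p ++ [x]) j]
      have hxne : ¬ ((-1 : Int) = x) := fun h => hx h.symm
      simp [fillR, hx, List.count_cons, hxne]

-- ===== VERDICT (by name: the statement is the Claim_ definition above) =====
theorem disk_insert_spec : Claim_equal_disk_insert := by
  unfold Claim_equal_disk_insert
  intro dm rm _ _
  unfold Spec_disk_insert disk_insert disk_insert_alt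
  have hA := foldA_eq rm dm [] 0
  rw [List.range_eq_range']
  simp only [List.nil_append, List.length_nil] at hA
  rw [hA, diLoop_eq]
  simp
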